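-- pv_equiv track=rewrite | github.com/MrTejpalSingh/Data_Structures | Small Practise Programs/Fundamentals Python/Module2/Practice Problems/level 1/pp_26.py | check_occurence
-- ===== SOURCE A (Python) =====
-- def check_occurence(string):
--     mat_ls = ["MAT","MAt","Mat","mat","maT","mAT","MaT","mAt"]
--     jet_ls = ["JET", "JEt", "Jet", "jet", "jeT", "jET", "JeT", "jEt"]
--     mat_c = 0
--     jet_c = 0
--     lst = string.split(" ")
--     for i in lst:
--         if i in mat_ls:
--             mat_c += 1
--     for i in lst:
--         if i in jet_ls:
--             jet_c += 1
--
--     if jet_c == mat_c: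
--         return True
--     else:
--         return False
-- ===== SOURCE B (Python) =====
-- def check_occurence(string):
--     diff = 0
--     for w in string.split(" "):
--         lw = w.lower()
--         if lw == "mat":
--             diff += 1
--         elif lw == "jet":
--             diff -= 1
--     return diff == 0
-- ===== Notes on version B (the rewrite author's own statement) =====
-- stated objective: simpler
-- what changed: Replaces A's two membership scans against hand-enumerated 8-variant case lists by a single pass keeping one signed balance counter and comparing each word case-insensitively via .lower().
import Mathlib
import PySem

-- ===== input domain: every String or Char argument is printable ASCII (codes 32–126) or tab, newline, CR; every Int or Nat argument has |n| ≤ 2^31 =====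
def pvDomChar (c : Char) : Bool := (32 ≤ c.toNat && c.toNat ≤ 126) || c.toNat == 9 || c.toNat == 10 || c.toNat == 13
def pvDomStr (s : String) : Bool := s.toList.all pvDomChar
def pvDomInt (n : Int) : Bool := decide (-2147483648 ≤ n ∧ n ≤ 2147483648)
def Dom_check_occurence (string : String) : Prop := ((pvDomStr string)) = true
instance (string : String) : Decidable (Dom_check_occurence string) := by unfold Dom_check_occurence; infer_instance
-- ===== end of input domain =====

-- B replaces A's two membership scans over hand-enumerated case-variant lists with one
-- pass keeping a signed balance counter, comparing words case-insensitively via lower().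

-- ===== PORT A =====
def check_occurence (string : String) : Bool :=
  let mat_ls : List String := ["MAT","MAt","Mat","mat","maT","mAT","MaT","mAt"]
  let jet_ls : List String := ["JET", "JEt", "Jet", "jet", "jeT", "jET", "JeT", "jEt"]
  let lst := PySem.Chars.splitOn string.toList " ".toList
  let mat_c : Int := lst.foldl (fun acc i => if i ∈ mat_ls.map String.toList then acc + 1 else acc) 0
  let jet_c : Int := lst.foldl (fun acc i => if i ∈ jet_ls.map String.toList then acc + 1 else acc) 0
  jet_c == mat_c

-- ===== PORT B =====
def check_occurence_alt (string : String) : Bool :=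
  let diff : Int := (PySem.Chars.splitOn string.toList " ".toList).foldl
    (fun d w =>
      let lw := PySem.Chars.lower w
      if lw = "mat".toList then d + 1 else if lw = "jet".toList then d - 1 else d) 0
  diff == 0

-- ===== PRECONDITION & SPEC =====
def Spec_check_occurence (string : String) (out : Bool) : Prop := out = check_occurence_alt string
instance (string : String) (out : Bool) : Decidable (Spec_check_occurence string out) := by unfold Spec_check_occurence; infer_instance

-- ===== CLAIM (what is proved, stated in full; the proofs are below) =====
def Claim_equal_check_occurence : Prop := ∀ (string : String), Dom_check_occurence string → Spec_check_occurence string (check_occurence string)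

-- ===== LEMMAS AND PROOFS =====

-- lowerChar sends exactly {lo, up} to lo (used at the five letter pairs of "mat"/"jet")
theorem pv_lowerChar_eq (c lo up : Char)
    (h1 : 97 ≤ lo.toNat) (h2 : lo.toNat ≤ 122) (h3 : up.toNat + 32 = lo.toNat) :
    PySem.Chars.lowerChar c = lo ↔ (c = lo ∨ c = up) := by
  constructor
  · intro h
    unfold PySem.Chars.lowerChar PySem.Chars.isupper at h
    split_ifs at h with hu
    · right
      simp only [Bool.and_eq_true, decide_eq_true_eq, Char.le_def, UInt32.le_iff_toNat_le] at hu
      have hA : ('A').val.toNat = 65 := by decide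
      have hZ : ('Z').val.toNat = 90 := by decide
      have hb : 65 ≤ c.toNat ∧ c.toNat ≤ 90 := by unfold Char.toNat; omega
      have hv := congrArg Char.toNat h
      rw [Char.toNat_ofNat, if_pos (Or.inl (by omega))] at hv
      have hc : c.toNat = up.toNat := by omega
      exact Char.ext (UInt32.toNat_inj.mp (by unfold Char.toNat at hc; omega))
    · left; exact h
  · intro h
    unfold PySem.Chars.lowerChar PySem.Chars.isupper
    rcases h with rfl | rfl
    · rw [if_neg]
      simp only [Bool.and_eq_true, decide_eq_true_eq, Char.le_def, UInt32.le_iff_toNat_le]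
      have hZ : ('Z').val.toNat = 90 := by decide
      unfold Char.toNat at h1 h2
      omega
    · rw [if_pos]
      · rw [h3, Char.ofNat_toNat]
      · simp only [Bool.and_eq_true, decide_eq_true_eq, Char.le_def, UInt32.le_iff_toNat_le]
        have hA : ('A').val.toNat = 65 := by decide
        have hZ : ('Z').val.toNat = 90 := by decide
        unfold Char.toNat at h1 h2 h3
        omega

-- a word lowercases to "mat" exactly when it is one of A's eight mat variants
theorem pv_lower_mat (w : List Char) :
    PySem.Chars.lower w = "mat".toList ↔
      w ∈ (["MAT","MAt","Mat","mat","maT","mAT","MaT","mAt"] : List String).map String.toList := by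
  constructor
  · intro h
    unfold PySem.Chars.lower at h
    rcases w with _ | ⟨c1, _ | ⟨c2, _ | ⟨c3, _ | ⟨c4, rest⟩⟩⟩⟩ <;> simp at h
    obtain ⟨h1, h2, h3⟩ := h
    rw [pv_lowerChar_eq c1 'm' 'M' (by decide) (by decide) (by decide)] at h1
    rw [pv_lowerChar_eq c2 'a' 'A' (by decide) (by decide) (by decide)] at h2
    rw [pv_lowerChar_eq c3 't' 'T' (by decide) (by decide) (by decide)] at h3
    rcases h1 with rfl | rfl <;> rcases h2 with rfl | rfl <;> rcases h3 with rfl | rfl <;> decide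
  · intro h
    fin_cases h <;> decide

-- a word lowercases to "jet" exactly when it is one of A's eight jet variants
theorem pv_lower_jet (w : List Char) :
    PySem.Chars.lower w = "jet".toList ↔
      w ∈ (["JET", "JEt", "Jet", "jet", "jeT", "jET", "JeT", "jEt"] : List String).map String.toList := by
  constructor
  · intro h
    unfold PySem.Chars.lower at h
    rcases w with _ | ⟨c1, _ | ⟨c2, _ | ⟨c3, _ | ⟨c4, rest⟩⟩⟩⟩ <;> simp at h
    obtain ⟨h1, h2, h3⟩ := h
    rw [pv_lowerChar_eq c1 'j' 'J' (by decide) (by decide) (by decide)] at h1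
    rw [pv_lowerChar_eq c2 'e' 'E' (by decide) (by decide) (by decide)] at h2
    rw [pv_lowerChar_eq c3 't' 'T' (by decide) (by decide) (by decide)] at h3
    rcases h1 with rfl | rfl <;> rcases h2 with rfl | rfl <;> rcases h3 with rfl | rfl <;> decide
  · intro h
    fin_cases h <;> decide

-- B's single-pass balance fold equals (#mat-lowering words) - (#jet-lowering words)
theorem pv_diff_fold (l : List (List Char)) (d : Int) :
    l.foldl (fun d w =>
      let lw := PySem.Chars.lower w
      if lw = "mat".toList then d + 1 else if lw = "jet".toList then d - 1 else d) d
    = d + (l.countP (fun w => decide (PySem.Chars.lower w = "mat".toList)) : Int)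
        - (l.countP (fun w => decide (PySem.Chars.lower w = "jet".toList)) : Int) := by
  induction l generalizing d with
  | nil => simp
  | cons w t ih =>
    simp only [List.foldl_cons, List.countP_cons]
    rw [ih]
    by_cases hm : PySem.Chars.lower w = ['m', 'a', 't']
    · have hj : ¬ PySem.Chars.lower w = ['j', 'e', 't'] := by rw [hm]; decide
      simp [hm]
      omega
    · by_cases hj : PySem.Chars.lower w = ['j', 'e', 't']
      · simp [hj]
        omega
      · simp [hm, hj]

-- A's variant-list membership count is B's lowercase-comparison count
theorem pv_countP_mat (l : List (List Char)) :
    l.countP (fun w => decide (w ∈ (["MAT","MAt","Mat","mat","maT","mAT","MaT","mAt"] : List String).map String.toList))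
    = l.countP (fun w => decide (PySem.Chars.lower w = "mat".toList)) :=
  List.countP_congr (fun x _ => by
    simp only [decide_eq_true_eq]
    exact (pv_lower_mat x).symm)

theorem pv_countP_jet (l : List (List Char)) :
    l.countP (fun w => decide (w ∈ (["JET", "JEt", "Jet", "jet", "jeT", "jET", "JeT", "jEt"] : List String).map String.toList))
    = l.countP (fun w => decide (PySem.Chars.lower w = "jet".toList)) :=
  List.countP_congr (fun x _ => by
    simp only [decide_eq_true_eq]
    exact (pv_lower_jet x).symm)

theorem check_occurence_spec : Claim_equal_check_occurence := by
  intro s _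
  unfold Spec_check_occurence check_occurence check_occurence_alt
  simp only []
  rw [PySem.List.foldl_ite_add_one (fun i => i ∈ (["MAT","MAt","Mat","mat","maT","mAT","MaT","mAt"] : List String).map String.toList)]
  rw [PySem.List.foldl_ite_add_one (fun i => i ∈ (["JET", "JEt", "Jet", "jet", "jeT", "jET", "JeT", "jEt"] : List String).map String.toList)]
  rw [pv_diff_fold, pv_countP_mat, pv_countP_jet]
  rw [Bool.eq_iff_iff]
  simp only [beq_iff_eq]
  omega
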